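-- pv_equiv track=rewrite | github.com/Studiofarma/coding-dojo | mastermind.py | evaluate_mastermind
-- ===== SOURCE A (Python) =====
-- def evaluate_mastermind(
--     guess: list[str], combination: list[str]
-- ) -> tuple[int, int]:
--     correct = 0
--     misplaced = 0
--     for i, element in enumerate(guess):
--         if element == combination[i]:
--             correct += 1
--             continue
--         if element in combination:
--             misplaced += 1
--     return (correct, misplaced)
-- ===== SOURCE B (Python) =====
-- def evaluate_mastermind(
--     guess: list[str], combination: list[str]
-- ) -> tuple[int, int]:
--     # Stage 1: collect the mismatched guess pegs (indexing combination[i] preserves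
--     # A's IndexError when guess is longer than combination).
--     mismatched = [g for i, g in enumerate(guess) if g != combination[i]]
--     # Stage 2: group-by-value — for each distinct combination colour, count how many
--     # mismatched pegs carry it; their total is exactly the misplaced count.
--     misplaced = sum(mismatched.count(v) for v in set(combination))
--     return (len(guess) - len(mismatched), misplaced)
-- ===== Notes on version B (the rewrite author's own statement) =====
-- stated objective: alternative
-- what changed: Replaces A's single branch-per-position loop carrying two counters by a two-stage group-by: first collect the list of mismatched guess pegs, then obtain misplaced by summing, over each distinct combination colour, how many mismatched pegs carry that colour (mismatched.count(v)), and recover correct as len(guess) - len(mismatched); no per-peg membership test remains.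
import Mathlib
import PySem

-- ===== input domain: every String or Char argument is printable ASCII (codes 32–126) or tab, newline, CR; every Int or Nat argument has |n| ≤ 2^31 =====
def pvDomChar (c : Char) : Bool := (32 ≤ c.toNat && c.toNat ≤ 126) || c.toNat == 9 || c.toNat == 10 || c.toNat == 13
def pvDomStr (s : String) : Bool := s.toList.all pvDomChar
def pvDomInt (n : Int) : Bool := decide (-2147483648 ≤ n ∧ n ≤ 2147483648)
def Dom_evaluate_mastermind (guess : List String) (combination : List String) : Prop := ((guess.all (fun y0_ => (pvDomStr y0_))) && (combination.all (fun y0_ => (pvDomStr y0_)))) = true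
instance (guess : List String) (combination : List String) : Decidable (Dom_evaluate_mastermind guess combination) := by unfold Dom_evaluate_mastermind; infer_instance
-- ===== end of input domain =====

-- B replaces A's two-counter branch loop by a two-stage group-by: collect the mismatched
-- guess pegs, then sum per distinct combination colour how many mismatched pegs carry it
-- (objective: alternative decomposition, similar cost).


-- ===== PORT A =====
-- literal port of A: one pass over enumerate(guess) carrying (correct, misplaced);
-- combination[i] is PySem.List.pyGetD, total only under Pre_ (out of range = IndexError).
def evaluate_mastermind (guess : List String) (combination : List String) : Int × Int :=
  (PySem.List.enumerate guess 0).foldl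
    (fun (acc : Int × Int) p =>
      if p.2 == PySem.List.pyGetD combination p.1 "" then (acc.1 + 1, acc.2)
      else if combination.contains p.2 then (acc.1, acc.2 + 1) else acc)
    (0, 0)

-- ===== PORT B =====
-- literal port of B: mismatched = [g for i, g in enumerate(guess) if g != combination[i]];
-- misplaced = sum(mismatched.count(v) for v in set(combination));
-- result (len(guess) - len(mismatched), misplaced).
def evaluate_mastermind_alt (guess : List String) (combination : List String) : Int × Int :=
  let mismatched :=
    ((PySem.List.enumerate guess 0).filter
      (fun p => !(p.2 == PySem.List.pyGetD combination p.1 ""))).map (·.2)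
  let misplaced : Int :=
    ((PySem.Set.ofList combination).map
      (fun v => (PySem.List.count mismatched v : Int))).sum
  ((guess.length : Int) - (mismatched.length : Int), misplaced)

-- ===== PRECONDITION & SPEC =====
-- Pre_ excludes only the inputs where Python A raises IndexError: guess longer than combination.
def Pre_evaluate_mastermind (guess : List String) (combination : List String) : Prop :=
  guess.length ≤ combination.length
instance (guess : List String) (combination : List String) : Decidable (Pre_evaluate_mastermind guess combination) := by unfold Pre_evaluate_mastermind; infer_instance

def pvWitness_evaluate_mastermind : List String × List String :=
  (["a", "b", "c"], ["b", "b", "d"])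

def Spec_evaluate_mastermind (guess : List String) (combination : List String) (out : Int × Int) : Prop := out = evaluate_mastermind_alt guess combination
instance (guess : List String) (combination : List String) (out : Int × Int) : Decidable (Spec_evaluate_mastermind guess combination out) := by unfold Spec_evaluate_mastermind; infer_instance

-- ===== CLAIM =====
def Claim_equal_evaluate_mastermind : Prop := ∀ (guess : List String) (combination : List String), Dom_evaluate_mastermind guess combination → Pre_evaluate_mastermind guess combination → Spec_evaluate_mastermind guess combination (evaluate_mastermind guess combination)

-- ===== LEMMAS AND PROOFS =====

-- A's fold from (c, m) counts the matched pairs into the first component and the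
-- mismatched-but-present pairs into the second; holds for every start index s.
theorem pvA (combination : List String) :
    ∀ (guess : List String) (s : Int) (c m : Int),
    (PySem.List.enumerate guess s).foldl
      (fun (acc : Int × Int) p =>
        if p.2 == PySem.List.pyGetD combination p.1 "" then (acc.1 + 1, acc.2)
        else if combination.contains p.2 then (acc.1, acc.2 + 1) else acc)
      (c, m)
    = (c + ((PySem.List.enumerate guess s).countP
          (fun p => p.2 == PySem.List.pyGetD combination p.1 "") : Int),
       m + ((PySem.List.enumerate guess s).countP
          (fun p => combination.contains p.2
                    && !(p.2 == PySem.List.pyGetD combination p.1 "")) : Int)) := by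
  intro guess
  induction guess with
  | nil => intro s c m; simp [PySem.List.enumerate_nil]
  | cons g rest ih =>
    intro s c m
    simp only [PySem.List.enumerate_cons, List.foldl_cons, List.countP_cons]
    by_cases hq : (g == PySem.List.pyGetD combination s "") = true
    · simp only [hq, if_pos, Bool.and_false, Bool.not_true]
      rw [ih]
      simp [Prod.ext_iff]
      ring
    · simp only [hq, if_neg, Bool.not_eq_true] at *
      by_cases hc : combination.contains g = true
      · simp only [hc, if_pos]
        rw [ih]
        simp [Prod.ext_iff]
        ring
      · simp only [hc, Bool.false_eq_true, if_false]
        rw [ih]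
        simp

-- summing l.count v over a duplicate-free list S counts the elements of l lying in S
theorem pv_sum_count (S : List String) (hS : S.Nodup) :
    ∀ (l : List String),
    (S.map (fun v => (l.count v : Int))).sum = (l.countP (fun x => S.contains x) : Int) := by
  intro l
  induction l with
  | nil => simp
  | cons x t ih =>
    have hcnt : ∀ v : String, ((x :: t).count v : Int)
        = (t.count v : Int) + (if v == x then (1 : Int) else 0) := by
      intro v
      by_cases h : v = x
      · subst h; simp
      · simp [beq_iff_eq, h, Ne.symm h]
    have hsplit : (S.map (fun v => ((x :: t).count v : Int))).sum
        = (S.map (fun v => (t.count v : Int))).sum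
          + (S.map (fun v => if v == x then (1 : Int) else 0)).sum := by
      rw [← PySem.List.sum_map_add_int]
      exact congrArg List.sum (List.map_congr_left (fun v _ => hcnt v))
    have hind : (S.map (fun v => if v == x then (1 : Int) else 0)).sum
        = (if S.contains x then (1 : Int) else 0) := by
      rw [PySem.List.sum_map_ite_one_zero]
      by_cases hx : x ∈ S
      · have : S.count x = 1 := List.count_eq_one_of_mem hS hx
        have hcp : S.countP (fun v => v == x) = S.count x := by
          simp [List.count, BEq.comm]
        simp [hcp, this, hx]
      · have : S.count x = 0 := by simp [List.count_eq_zero, hx]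
        have hcp : S.countP (fun v => v == x) = S.count x := by
          simp [List.count, BEq.comm]
        simp [hcp, this, hx]
    rw [hsplit, ih, hind, List.countP_cons]
    by_cases hx : S.contains x = true
    · simp only [hx, if_pos]
      push_cast
      ring
    · simp only [hx, Bool.false_eq_true, if_false]
      omega

-- ===== VERDICT =====
theorem evaluate_mastermind_spec : Claim_equal_evaluate_mastermind := by
  intro guess combination _ _
  unfold Spec_evaluate_mastermind evaluate_mastermind evaluate_mastermind_alt
  rw [pvA combination guess 0 0 0]
  have hnodup : (PySem.Set.ofList combination).Nodup := PySem.Set.nodup_ofList combination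
  have hmem : ∀ x, (PySem.Set.ofList combination).contains x = combination.contains x := by
    intro x
    by_cases hx : x ∈ combination
    · simp [hx, PySem.Set.mem_ofList]
    · simp [hx, PySem.Set.mem_ofList]
  -- second component
  have hsnd :
      ((PySem.Set.ofList combination).map
        (fun v => (PySem.List.count
          (((PySem.List.enumerate guess 0).filter
            (fun p => !(p.2 == PySem.List.pyGetD combination p.1 ""))).map (·.2)) v : Int))).sum
      = ((PySem.List.enumerate guess 0).countP
          (fun p => combination.contains p.2
                    && !(p.2 == PySem.List.pyGetD combination p.1 "")) : Int) := by
    simp only [PySem.List.count_eq]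
    rw [pv_sum_count _ hnodup, List.countP_map, List.countP_filter]
    norm_cast
    exact List.countP_congr (fun p _ => by simp)
  -- first component
  have hfst :
      (guess.length : Int)
        - ((((PySem.List.enumerate guess 0).filter
            (fun p => !(p.2 == PySem.List.pyGetD combination p.1 ""))).map (·.2)).length : Int)
      = ((PySem.List.enumerate guess 0).countP
          (fun p => p.2 == PySem.List.pyGetD combination p.1 "") : Int) := by
    rw [List.length_map, ← List.countP_eq_length_filter]
    have hlen : (PySem.List.enumerate guess 0).length = guess.length :=
      PySem.List.length_enumerate guess 0
    have h := List.length_eq_countP_add_countP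
      (fun p : Int × String => p.2 == PySem.List.pyGetD combination p.1 "")
      (l := PySem.List.enumerate guess 0)
    have hcd : (PySem.List.enumerate guess 0).countP
          (fun p => !(p.2 == PySem.List.pyGetD combination p.1 ""))
        = (PySem.List.enumerate guess 0).countP
          (fun a => decide (¬((a.2 == PySem.List.pyGetD combination a.1 "") = true))) :=
      List.countP_congr (fun p _ => by simp)
    omega
  simp only [Prod.ext_iff]
  exact ⟨by rw [← hfst]; ring, by rw [hsnd]; ring⟩
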